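-- pv_equiv track=rewrite | github.com/bohunicka14/Graph-Algorithms-Optimalization | havel_hakimi.py | update_array
-- ===== SOURCE A (Python) =====
-- def update_array(array):
--     result = []
--     steps = array[0]
--     for i in range(1, len(array)):
--         if i - 1 < steps:
--             result.append(array[i] - 1)
--         else:
--             result.append(array[i])
--     result.sort(reverse=True)
--     return result
-- ===== SOURCE B (Python) =====
-- def update_array(array):
--     steps = array[0]
--     tail = array[1:]
--     k = min(max(steps, 0), len(tail))
--     dec = sorted((x - 1 for x in tail[:k]), reverse=True)
--     rest = sorted(tail[k:], reverse=True)
--     out = []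
--     i = j = 0
--     while i < len(dec) and j < len(rest):
--         if dec[i] >= rest[j]:
--             out.append(dec[i]); i += 1
--         else:
--             out.append(rest[j]); j += 1
--     out.extend(dec[i:])
--     out.extend(rest[j:])
--     return out
-- ===== Notes on version B (the rewrite author's own statement) =====
-- stated objective: alternative
-- what changed: Instead of decrementing the first `steps` tail elements in place and re-sorting the whole list, B sorts the decremented prefix and the untouched suffix separately and merges the two descending runs with a hand-written linear merge.
import Mathlib
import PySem

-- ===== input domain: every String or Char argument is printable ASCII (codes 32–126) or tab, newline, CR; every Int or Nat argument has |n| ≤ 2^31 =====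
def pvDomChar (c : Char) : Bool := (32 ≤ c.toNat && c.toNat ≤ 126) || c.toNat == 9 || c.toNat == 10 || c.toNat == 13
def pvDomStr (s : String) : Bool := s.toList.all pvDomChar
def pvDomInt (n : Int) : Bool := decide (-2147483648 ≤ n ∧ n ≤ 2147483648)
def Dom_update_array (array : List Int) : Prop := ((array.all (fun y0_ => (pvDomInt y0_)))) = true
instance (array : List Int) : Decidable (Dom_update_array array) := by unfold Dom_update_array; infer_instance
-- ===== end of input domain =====

-- B changes the decomposition: instead of decrementing in place and re-sorting the whole
-- list, it sorts the decremented prefix and the untouched suffix separately and merges the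
-- two descending runs (objective: alternative; equal return values, no speed claim).

-- ===== PORT A =====
-- Literal port of A: build `result` by the index loop over range(1, len(array)),
-- then sort it descending.  `array[0]` raises IndexError on [], excluded by Pre_.
def update_array (array : List Int) : List Int :=
  match array with
  | [] => []   -- unreachable under Pre_update_array (Python raises IndexError here)
  | steps :: _ =>
      let result := (PySem.List.pyRange 1 (array.length : Int) 1).foldl
        (fun acc i =>
          if i - 1 < steps then acc ++ [(PySem.List.pyGet? array i).getD 0 - 1]
          else acc ++ [(PySem.List.pyGet? array i).getD 0]) []
      PySem.List.sorted result (fun x => x) true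

-- ===== PORT B =====
-- merge of two descending runs (the hand-written while loop of Source B)
def mergeDesc : List Int → List Int → List Int
  | [], ys => ys
  | x :: xs, [] => x :: xs
  | x :: xs, y :: ys =>
      if y ≤ x then x :: mergeDesc xs (y :: ys)
      else y :: mergeDesc (x :: xs) ys
termination_by xs ys => xs.length + ys.length

def update_array_alt (array : List Int) : List Int :=
  match array with
  | [] => []   -- unreachable under Pre_update_array (Python raises IndexError here)
  | steps :: tail =>
      let k : Nat := min (max steps 0).toNat tail.length
      let dec := PySem.List.sorted ((tail.take k).map (fun x => x - 1)) (fun x => x) true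
      let rest := PySem.List.sorted (tail.drop k) (fun x => x) true
      mergeDesc dec rest

-- ===== PRECONDITION & SPEC =====
-- Pre_ excludes only the empty list, on which A raises IndexError (array[0]).
def Pre_update_array (array : List Int) : Prop := array ≠ []
instance (array : List Int) : Decidable (Pre_update_array array) := by
  unfold Pre_update_array; infer_instance

def pvWitness_update_array : List Int := [2, 3, 3, 1]

def Spec_update_array (array : List Int) (out : List Int) : Prop := out = update_array_alt array
instance (array : List Int) (out : List Int) : Decidable (Spec_update_array array out) := by unfold Spec_update_array; infer_instance

-- ===== CLAIM (what is proved, stated in full; the proofs are below) =====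
def Claim_equal_update_array : Prop := ∀ (array : List Int), Dom_update_array array → Pre_update_array array → Spec_update_array array (update_array array)

-- ===== LEMMAS AND PROOFS =====

-- A's loop, characterized: element j of the tail is decremented iff j < steps.
def decCond : Int → List Int → List Int
  | _, [] => []
  | s, y :: t => (if 0 < s then y - 1 else y) :: decCond (s - 1) t

lemma decCond_nonpos (s : Int) (ys : List Int) (h : s ≤ 0) : decCond s ys = ys := by
  induction ys generalizing s with
  | nil => rfl
  | cons y t ih =>
      simp only [decCond, if_neg (by omega : ¬ 0 < s), ih (s - 1) (by omega)]

lemma decCond_eq (ys : List Int) (s : Int) :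
    decCond s ys = (ys.take s.toNat).map (fun x => x - 1) ++ ys.drop s.toNat := by
  induction ys generalizing s with
  | nil => simp [decCond]
  | cons y t ih =>
      by_cases h : 0 < s
      · have hs : s.toNat = (s - 1).toNat + 1 := by omega
        simp only [decCond, if_pos h, hs, List.take_succ_cons, List.map_cons,
          List.drop_succ_cons, List.cons_append, ih (s - 1)]
      · have hs : s.toNat = 0 := by omega
        simp only [decCond, if_neg h, hs, List.take_zero, List.map_nil,
          List.drop_zero, List.nil_append, decCond_nonpos (s - 1) t (by omega)]

lemma foldl_if_append (L : List Int) (p : Int → Prop) [DecidablePred p]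
    (f g : Int → Int) (acc : List Int) :
    L.foldl (fun acc i => if p i then acc ++ [f i] else acc ++ [g i]) acc
      = acc ++ L.map (fun i => if p i then f i else g i) := by
  induction L generalizing acc with
  | nil => simp
  | cons a t ih =>
      simp only [List.foldl_cons, List.map_cons]
      by_cases h : p a
      · rw [if_pos h, if_pos h, ih]; simp
      · rw [if_neg h, if_neg h, ih]; simp

lemma loopA (steps : Int) (ys : List Int) : ∀ (xs : List Int),
    (PySem.List.pyRange (xs.length : Int) ((xs.length : Int) + (ys.length : Int)) 1).map
      (fun i => if i - 1 < steps
        then (PySem.List.pyGet? (xs ++ ys) i).getD 0 - 1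
        else (PySem.List.pyGet? (xs ++ ys) i).getD 0)
      = decCond (steps + 1 - (xs.length : Int)) ys := by
  induction ys with
  | nil =>
      intro xs
      rw [PySem.List.pyRange_one_eq_nil (by simp)]
      rfl
  | cons y t ih =>
      intro xs
      rw [PySem.List.pyRange_one_cons (by push_cast [List.length_cons]; omega), List.map_cons]
      have hget : (PySem.List.pyGet? (xs ++ y :: t) ((xs.length : Nat) : Int)).getD 0 = y := by
        simp

      have htail := ih (xs ++ [y])
      have harg1 : (((xs ++ [y]).length : Nat) : Int) = ((xs.length : Nat) : Int) + 1 := by simp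
      have harg2 : (((xs.length : Nat) : Int) + 1) + ((t.length : Nat) : Int)
          = ((xs.length : Nat) : Int) + (((y :: t).length : Nat) : Int) := by
        push_cast [List.length_cons]; ring
      have happ : xs ++ [y] ++ t = xs ++ y :: t := by simp
      rw [harg1, harg2, happ] at htail
      rw [htail]
      simp only [hget, decCond]
      congr 1
      · by_cases h : ((xs.length : Nat) : Int) - 1 < steps
        · rw [if_pos h, if_pos (by omega)]
        · rw [if_neg h, if_neg (by omega)]
      · congr 1; ring

lemma mergeDesc_perm (xs ys : List Int) : (mergeDesc xs ys).Perm (xs ++ ys) := by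
  fun_induction mergeDesc xs ys with
  | case1 ys => simp
  | case2 x xs => simp
  | case3 x xs y ys h ih =>
      simpa using ih.cons x
  | case4 x xs y ys h ih =>
      exact (ih.cons y).trans List.perm_middle.symm

lemma mergeDesc_pairwise (xs ys : List Int)
    (hx : xs.Pairwise (fun a b => b ≤ a)) (hy : ys.Pairwise (fun a b => b ≤ a)) :
    (mergeDesc xs ys).Pairwise (fun a b => b ≤ a) := by
  fun_induction mergeDesc xs ys with
  | case1 ys => exact hy
  | case2 x xs => exact hx
  | case3 x xs y ys h ih =>
      rw [List.pairwise_cons] at hx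
      refine List.Pairwise.cons ?_ (ih hx.2 hy)
      intro a ha
      have := (mergeDesc_perm xs (y :: ys)).mem_iff.mp ha
      rcases List.mem_append.mp this with h1 | h1
      · exact hx.1 a (by simpa using h1)
      · rcases List.mem_cons.mp (by simpa using h1) with rfl | h2
        · exact h
        · rw [List.pairwise_cons] at hy
          exact le_trans (hy.1 a h2) h
  | case4 x xs y ys h ih =>
      rw [List.pairwise_cons] at hy
      refine List.Pairwise.cons ?_ (ih hx hy.2)
      intro a ha
      have := (mergeDesc_perm (x :: xs) ys).mem_iff.mp ha
      rcases List.mem_append.mp this with h1 | h1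
      · rcases List.mem_cons.mp (by simpa using h1) with rfl | h2
        · omega
        · rw [List.pairwise_cons] at hx
          exact le_trans (hx.1 a h2) (by omega)
      · exact hy.1 a h1

-- a weakly descending permutation of xs IS sorted(xs, reverse=True)
lemma sorted_rev_eq_of_perm_of_desc (xs ys : List Int)
    (hperm : ys.Perm xs) (hp : ys.Pairwise (fun a b => b ≤ a)) :
    PySem.List.sorted xs (fun x => x) true = ys := by
  exact List.Perm.eq_of_pairwise
    (fun a b _ _ h1 h2 => le_antisymm h2 h1)
    (PySem.List.sorted_pairwise_rev xs (fun x => x)) hp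
    ((PySem.List.sorted_perm xs (fun x => x) true).trans hperm.symm)

lemma take_clamp (tail : List Int) (steps : Int) :
    tail.take (min (max steps 0).toNat tail.length) = tail.take steps.toNat := by
  have h : (max steps 0).toNat = steps.toNat := by omega
  rw [h]
  rcases le_or_gt steps.toNat tail.length with hle | hgt
  · rw [min_eq_left hle]
  · rw [min_eq_right (by omega), List.take_of_length_le (le_refl _),
      List.take_of_length_le (by omega)]

lemma drop_clamp (tail : List Int) (steps : Int) :
    tail.drop (min (max steps 0).toNat tail.length) = tail.drop steps.toNat := by
  have h : (max steps 0).toNat = steps.toNat := by omega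
  rw [h]
  rcases le_or_gt steps.toNat tail.length with hle | hgt
  · rw [min_eq_left hle]
  · rw [min_eq_right (by omega), List.drop_of_length_le (le_refl _),
      List.drop_of_length_le (by omega)]

-- ===== VERDICT (by name: the statement is the Claim_ definition above) =====
theorem update_array_spec : Claim_equal_update_array := by
  intro array _ hpre
  unfold Spec_update_array
  match array with
  | [] => exact absurd rfl hpre
  | steps :: tail =>
      show update_array (steps :: tail) = update_array_alt (steps :: tail)
      unfold update_array update_array_alt
      simp only
      rw [take_clamp, drop_clamp]
      rw [foldl_if_append _ (fun i => i - 1 < steps), List.nil_append]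
      have hrange : (PySem.List.pyRange 1 (((steps :: tail).length : Nat) : Int) 1)
          = PySem.List.pyRange (([steps] : List Int).length : Int)
              ((([steps] : List Int).length : Int) + ((tail.length : Nat) : Int)) 1 := by
        congr 1 <;> simp <;> try omega
      rw [hrange]
      have hloop := loopA steps tail [steps]
      rw [show ([steps] : List Int) ++ tail = steps :: tail from rfl] at hloop
      rw [hloop]
      have hs1 : steps + 1 - (([steps] : List Int).length : Int) = steps := by
        simp
      rw [hs1, decCond_eq]
      set dec := PySem.List.sorted ((tail.take steps.toNat).map (fun x => x - 1)) (fun x => x) true with hdec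
      set rest := PySem.List.sorted (tail.drop steps.toNat) (fun x => x) true with hrest
      apply sorted_rev_eq_of_perm_of_desc
      · exact (mergeDesc_perm dec rest).trans
          (List.Perm.append
            (PySem.List.sorted_perm _ (fun x => x) true)
            (PySem.List.sorted_perm _ (fun x => x) true))
      · exact mergeDesc_pairwise dec rest
          (PySem.List.sorted_pairwise_rev ((tail.take steps.toNat).map (fun x => x - 1)) (fun x => x))
          (PySem.List.sorted_pairwise_rev (tail.drop steps.toNat) (fun x => x))
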